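-- pv_equiv track=rewrite | github.com/Paeans/phylognn | genome_file.py | dict2adj
-- ===== SOURCE A (Python) =====
-- def dict2adj(adj_dict, start):
--     res = []
--     while True:
--         end = start + (1 if start % 2 == 0 else -1)
--         res += [start, end]
--         if end not in adj_dict.keys():
--             break
--         start = adj_dict[end]
--
--     return [(res[i]//2 + 1) * (-1 if res[i] > res[i+1] else 1) for i in range(0, len(res), 2)]
-- ===== SOURCE B (Python) =====
-- def dict2adj(adj_dict, start):
--     # Sentinel-driven pointer chase, split by parity: each branch produces the signed
--     # gene with a two's-complement shift (~s >> 1 for odd s, (s >> 1) + 1 for even s)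
--     # and advances via dict.get, whose None result ends the walk -- no membership
--     # test, no break, no intermediate pair list or decoding pass.
--     genes = []
--     s = start
--     while s is not None:
--         if s & 1:
--             genes.append(~s >> 1)
--             s = adj_dict.get(s - 1)
--         else:
--             genes.append((s >> 1) + 1)
--             s = adj_dict.get(s + 1)
--     return genes
-- ===== Notes on version B (the rewrite author's own statement) =====
-- stated objective: simpler
-- what changed: B replaces A's two-stage structure (append start/end pairs to a flat res list inside a membership-tested break loop, then decode it with an index-stepping comprehension) by a sentinel-driven loop split by parity: each branch emits the signed gene directly via two's-complement shifts (~s >> 1 for odd s, (s >> 1) + 1 for even s) and advances with dict.get, whose None ends the walk; no pair list, no second pass, no membership test.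
import Mathlib
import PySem

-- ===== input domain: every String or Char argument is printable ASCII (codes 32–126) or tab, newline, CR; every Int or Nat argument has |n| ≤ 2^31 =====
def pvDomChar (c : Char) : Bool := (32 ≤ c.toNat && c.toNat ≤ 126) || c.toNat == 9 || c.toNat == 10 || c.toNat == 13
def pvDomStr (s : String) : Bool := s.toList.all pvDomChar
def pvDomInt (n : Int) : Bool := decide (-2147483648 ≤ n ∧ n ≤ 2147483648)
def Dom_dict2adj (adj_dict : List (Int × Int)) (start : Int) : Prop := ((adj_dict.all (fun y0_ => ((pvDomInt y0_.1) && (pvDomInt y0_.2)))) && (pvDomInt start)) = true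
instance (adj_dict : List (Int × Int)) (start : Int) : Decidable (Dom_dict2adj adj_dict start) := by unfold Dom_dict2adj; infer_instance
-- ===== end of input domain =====

-- B replaces A's build-pairs-then-decode structure by a parity-split sentinel loop that
-- emits each signed gene with two's-complement shifts and advances via dict.get (objective: simpler).


-- ===== PORT A =====
-- A's while loop; fuel bounds the number of successful dict lookups (under Pre_ the loop always
-- stops via the `none` branch before fuel can run out — the `0` arm is only a totality guard).
def dict2adjLoop (d : PySem.Dict Int Int) (fuel : Nat) (start : Int) (res : List Int) : List Int :=
  let e := start + (if PySem.Int.mod start 2 = 0 then 1 else -1)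
  let res' := res ++ [start, e]
  match d.get? e with
  | none => res'
  | some nxt =>
    match fuel with
    | 0 => res'
    | f + 1 => dict2adjLoop d f nxt res'

-- A's comprehension: [(res[i]//2 + 1) * (-1 if res[i] > res[i+1] else 1) for i in range(0, len(res), 2)]
def dict2adjDecode (res : List Int) : List Int :=
  (PySem.List.pyRange 0 (PySem.List.len res) 2).map (fun i =>
    (PySem.Int.floordiv (PySem.List.pyGetD res i 0) 2 + 1) *
      (if PySem.List.pyGetD res (i + 1) 0 < PySem.List.pyGetD res i 0 then -1 else 1))

def dict2adj (adj_dict : List (Int × Int)) (start : Int) : List Int :=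
  dict2adjDecode (dict2adjLoop (PySem.Dict.ofList adj_dict) adj_dict.length start [])

-- ===== PORT B =====
-- B's while loop over the Optional current start (None = stop); Python's `s & 1`, `~s`, `s >> 1`
-- are PySem.Int.band / Int.not / `>>>` — Python-exact per the prelude. Same fuel guard as above.
def dict2adjAltLoop (d : PySem.Dict Int Int) (fuel : Nat) (s : Int) (genes : List Int) : List Int :=
  if PySem.Int.band s 1 ≠ 0 then
    let genes' := genes ++ [Int.not s >>> (1 : Nat)]
    match d.get? (s - 1) with
    | none => genes'
    | some nxt =>
      match fuel with
      | 0 => genes'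
      | f + 1 => dict2adjAltLoop d f nxt genes'
  else
    let genes' := genes ++ [(s >>> (1 : Nat)) + 1]
    match d.get? (s + 1) with
    | none => genes'
    | some nxt =>
      match fuel with
      | 0 => genes'
      | f + 1 => dict2adjAltLoop d f nxt genes'

def dict2adj_alt (adj_dict : List (Int × Int)) (start : Int) : List Int :=
  dict2adjAltLoop (PySem.Dict.ofList adj_dict) adj_dict.length start []

-- ===== PRECONDITION & SPEC =====
-- One step of the pointer chase on "end" keys: follow the dict, then take the parity successor.
def dict2adjChase (d : PySem.Dict Int Int) (e : Int) : Int :=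
  match d.get? e with
  | some v => v + (if PySem.Int.mod v 2 = 0 then 1 else -1)
  | none => e

-- Pre_ excludes exactly the inputs on which Python A loops forever: A terminates iff the chain of
-- "end" keys leaves the dict; a terminating chain visits distinct keys, hence leaves within
-- |adj_dict| chase steps, and a non-key is a fixed point of the chase, so this test is exact.
def Pre_dict2adj (adj_dict : List (Int × Int)) (start : Int) : Prop :=
  (PySem.Dict.ofList adj_dict).get?
    ((dict2adjChase (PySem.Dict.ofList adj_dict))^[adj_dict.length]
      (start + (if PySem.Int.mod start 2 = 0 then 1 else -1))) = none

instance (adj_dict : List (Int × Int)) (start : Int) : Decidable (Pre_dict2adj adj_dict start) := by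
  unfold Pre_dict2adj; infer_instance

def pvWitness_dict2adj : (List (Int × Int)) × Int := ([(1, 2)], 0)

def Spec_dict2adj (adj_dict : List (Int × Int)) (start : Int) (out : List Int) : Prop := out = dict2adj_alt adj_dict start
instance (adj_dict : List (Int × Int)) (start : Int) (out : List Int) : Decidable (Spec_dict2adj adj_dict start out) := by unfold Spec_dict2adj; infer_instance

-- ===== CLAIM (what is proved, stated in full; the proofs are below) =====
def Claim_equal_dict2adj : Prop := ∀ (adj_dict : List (Int × Int)) (start : Int), Dom_dict2adj adj_dict start → Pre_dict2adj adj_dict start → Spec_dict2adj adj_dict start (dict2adj adj_dict start)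

-- ===== LEMMAS AND PROOFS =====

-- Bridging the bit operations to arithmetic.
lemma pv_shift1 (s : Int) : s >>> (1 : Nat) = PySem.Int.floordiv s 2 := by
  have h : PySem.Int.floordiv s 2 = s / 2 := by
    simp [PySem.Int.floordiv, Int.fdiv_eq_ediv]
  rw [h]
  cases s with
  | ofNat n =>
    show Int.ofNat (n >>> 1) = _
    simp [Nat.shiftRight_eq_div_pow]
  | negSucc n =>
    show Int.negSucc (n >>> 1) = _
    simp [Nat.shiftRight_eq_div_pow]; omega

lemma pv_not_eq (s : Int) : Int.not s = -s - 1 := by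
  cases s with
  | ofNat n => show Int.negSucc n = -(Int.ofNat n) - 1; simp; omega
  | negSucc n => show Int.ofNat n = -(Int.negSucc n) - 1; simp

lemma pv_floordiv_two (s : Int) : PySem.Int.floordiv s 2 = s / 2 := by
  simp [PySem.Int.floordiv, Int.fdiv_eq_ediv]

lemma pv_mod_two (s : Int) : PySem.Int.mod s 2 = s % 2 := by
  simp [PySem.Int.mod, Int.fmod_eq_emod]

lemma dict2adjLoop_unfold (d : PySem.Dict Int Int) (fuel : Nat) (s : Int) (res : List Int) :
    dict2adjLoop d fuel s res =
      (match d.get? (s + (if PySem.Int.mod s 2 = 0 then 1 else -1)) with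
       | none => res ++ [s, s + (if PySem.Int.mod s 2 = 0 then 1 else -1)]
       | some nxt =>
         match fuel with
         | 0 => res ++ [s, s + (if PySem.Int.mod s 2 = 0 then 1 else -1)]
         | f + 1 => dict2adjLoop d f nxt (res ++ [s, s + (if PySem.Int.mod s 2 = 0 then 1 else -1)])) := by
  conv_lhs => rw [dict2adjLoop]

-- B's gene and B's next key, as single expressions.
def dict2adjGene (s : Int) : Int :=
  if PySem.Int.band s 1 ≠ 0 then Int.not s >>> (1 : Nat) else (s >>> (1 : Nat)) + 1

def dict2adjEnd (s : Int) : Int :=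
  if PySem.Int.band s 1 ≠ 0 then s - 1 else s + 1

-- B's two structurally identical branches, collapsed into one.
lemma dict2adjAltLoop_unfold (d : PySem.Dict Int Int) (fuel : Nat) (s : Int) (g : List Int) :
    dict2adjAltLoop d fuel s g =
      (match d.get? (dict2adjEnd s) with
       | none => g ++ [dict2adjGene s]
       | some nxt =>
         match fuel with
         | 0 => g ++ [dict2adjGene s]
         | f + 1 => dict2adjAltLoop d f nxt (g ++ [dict2adjGene s])) := by
  rw [dict2adjAltLoop]
  unfold dict2adjGene dict2adjEnd
  by_cases h : PySem.Int.band s 1 ≠ 0 <;> simp [h]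

-- Accumulator lemmas: both loops only append to their accumulator.
lemma dict2adjLoop_acc (d : PySem.Dict Int Int) :
    ∀ (f : Nat) (s : Int) (res : List Int),
      dict2adjLoop d f s res = res ++ dict2adjLoop d f s [] := by
  intro f
  induction f with
  | zero =>
    intro s res
    rw [dict2adjLoop_unfold, dict2adjLoop_unfold]
    cases d.get? (s + (if PySem.Int.mod s 2 = 0 then 1 else -1)) <;> simp
  | succ f ih =>
    intro s res
    rw [dict2adjLoop_unfold, dict2adjLoop_unfold]
    cases h : d.get? (s + (if PySem.Int.mod s 2 = 0 then 1 else -1)) with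
    | none => simp
    | some nxt =>
      simp only []
      rw [ih nxt (res ++ [s, _]), ih nxt ([] ++ [s, _])]
      simp

lemma dict2adjAltLoop_acc (d : PySem.Dict Int Int) :
    ∀ (f : Nat) (s : Int) (g : List Int),
      dict2adjAltLoop d f s g = g ++ dict2adjAltLoop d f s [] := by
  intro f
  induction f with
  | zero =>
    intro s g
    rw [dict2adjAltLoop_unfold, dict2adjAltLoop_unfold]
    cases d.get? (dict2adjEnd s) <;> simp
  | succ f ih =>
    intro s g
    rw [dict2adjAltLoop_unfold, dict2adjAltLoop_unfold]
    cases h : d.get? (dict2adjEnd s) with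
    | none => simp
    | some nxt =>
      simp only []
      rw [ih nxt (g ++ [_]), ih nxt ([] ++ [_])]
      simp

-- A's comprehension, rewritten over Nat indices.
lemma dict2adjDecode_getD (res : List Int) :
    dict2adjDecode res = (List.range ((res.length + 1) / 2)).map
      (fun k => (PySem.Int.floordiv (res.getD (2*k) 0) 2 + 1) *
        (if res.getD (2*k+1) 0 < res.getD (2*k) 0 then -1 else 1)) := by
  unfold dict2adjDecode
  rw [PySem.List.pyRange_of_pos 0 _ (by norm_num), List.map_map]
  have hc : (if (0:Int) < PySem.List.len res then ((PySem.List.len res - 0 + 2 - 1)/2).toNat else 0)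
      = (res.length + 1) / 2 := by
    simp [PySem.List.len_eq]
    split <;> omega
  rw [hc]
  apply List.map_congr_left
  intro k hk
  have h1 : (0:Int) + 2 * (k:Int) = ((2*k : Nat) : Int) := by push_cast; ring
  have h3 : ((2*k : Nat) : Int) + 1 = ((2*k+1 : Nat) : Int) := by push_cast; ring
  simp only [Function.comp, h1, h3, PySem.List.pyGetD_natCast]

-- Decoding peels one start/end pair off the front.
lemma dict2adjDecode_cons2 (a b : Int) (L : List Int) :
    dict2adjDecode (a :: b :: L) =
      ((PySem.Int.floordiv a 2 + 1) * (if b < a then -1 else 1)) :: dict2adjDecode L := by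
  rw [dict2adjDecode_getD, dict2adjDecode_getD]
  have h : ((a :: b :: L).length + 1) / 2 = (L.length + 1) / 2 + 1 := by simp; omega
  rw [h, List.range_succ_eq_map, List.map_cons, List.map_map]
  simp [Function.comp, Nat.succ_eq_add_one, Nat.mul_add]

lemma dict2adjDecode_nil : dict2adjDecode [] = [] := by
  rw [dict2adjDecode_getD]; simp

-- Both loops chase the same end key.
lemma dict2adj_end_eq (s : Int) :
    s + (if PySem.Int.mod s 2 = 0 then 1 else -1) = dict2adjEnd s := by
  unfold dict2adjEnd
  rw [PySem.Int.band_one, pv_mod_two]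
  have := Int.emod_two_eq s
  split_ifs <;> omega

-- The gene A decodes from one start/end pair equals the gene B's shift produces.
lemma dict2adj_gene_eq (s : Int) :
    (PySem.Int.floordiv s 2 + 1) *
        (if s + (if PySem.Int.mod s 2 = 0 then 1 else -1) < s then -1 else 1) =
      dict2adjGene s := by
  unfold dict2adjGene
  rw [PySem.Int.band_one, pv_shift1, pv_shift1, pv_not_eq, pv_floordiv_two, pv_floordiv_two,
    pv_mod_two]
  have := Int.emod_two_eq s
  rcases this with h | h <;> rw [h]
  · rw [if_neg (by omega : ¬ ((0:Int) ≠ 0)), if_pos (rfl : (0:Int) = 0),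
      if_neg (by omega : ¬ (s + 1 < s)), mul_one]
  · rw [if_pos (by omega : (1:Int) ≠ 0), if_neg (by omega : ¬ ((1:Int) = 0)),
      if_pos (by omega : s + -1 < s)]
    have hm : s % 2 = 1 := h
    have : (-s - 1) / 2 = -(s / 2 + 1) := by omega
    rw [this]; ring

lemma dict2adjDecode_pair (s : Int) :
    dict2adjDecode [s, s + (if PySem.Int.mod s 2 = 0 then 1 else -1)] = [dict2adjGene s] := by
  rw [dict2adjDecode_cons2, dict2adjDecode_nil, dict2adj_gene_eq]

lemma dict2adj_loops_eq (d : PySem.Dict Int Int) :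
    ∀ (f : Nat) (s : Int),
      dict2adjDecode (dict2adjLoop d f s []) = dict2adjAltLoop d f s [] := by
  intro f
  induction f with
  | zero =>
    intro s
    rw [dict2adjLoop_unfold, dict2adjAltLoop_unfold, ← dict2adj_end_eq s]
    cases d.get? (s + (if PySem.Int.mod s 2 = 0 then 1 else -1)) <;>
      simpa using dict2adjDecode_pair s
  | succ f ih =>
    intro s
    rw [dict2adjLoop_unfold, dict2adjAltLoop_unfold, ← dict2adj_end_eq s]
    cases h : d.get? (s + (if PySem.Int.mod s 2 = 0 then 1 else -1)) with
    | none => simpa using dict2adjDecode_pair s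
    | some nxt =>
      simp only [List.nil_append]
      rw [dict2adjLoop_acc, dict2adjAltLoop_acc]
      simp only [List.cons_append, List.nil_append]
      rw [dict2adjDecode_cons2, dict2adj_gene_eq, ih nxt]

-- ===== VERDICT (by name: the statement is the Claim_ definition above) =====
theorem dict2adj_spec : Claim_equal_dict2adj := by
  intro adj_dict start _ _
  unfold Spec_dict2adj dict2adj dict2adj_alt
  exact dict2adj_loops_eq _ _ _
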